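-- pv_equiv track=rewrite | github.com/gomgoon/Algorithm-AutoSolve | 프로그래머스/2/42626. 더 맵게/더 맵게.py | solution
-- ===== SOURCE A (Python) =====
-- import heapq
--
-- def solution(scoville, K):
--     answer = 0
--     heapq.heapify(scoville)
--
--     while scoville[0] < K:
--         if len(scoville) == 1:
--             answer = -1
--             break
--         temp = heapq.heappop(scoville) + (heapq.heappop(scoville) * 2)
--         heapq.heappush(scoville, temp)
--         answer +=1
--
--     return answer
-- ===== SOURCE B (Python) =====
-- def solution(scoville, K):
--     # no priority structure at all: each round two linear min-scans over the
--     # plain list, removing the found minima in place and appending the mix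
--     # (mutates scoville in place, like A's heapify; equivalence is about the
--     # return value only).
--     answer = 0
--     while min(scoville) < K:
--         if len(scoville) == 1:
--             return -1
--         a = min(scoville)
--         scoville.remove(a)
--         b = min(scoville)
--         scoville.remove(b)
--         scoville.append(a + b * 2)
--         answer += 1
--     return answer
-- ===== Notes on version B (the rewrite author's own statement) =====
-- stated objective: simpler
-- what changed: Dropped heapq entirely: each round finds the two smallest values by plain linear min() scans and list.remove, appending the mix at the end, instead of maintaining a binary heap; both mutate scoville in place, and the equivalence is about the return value only.
import Mathlib
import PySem

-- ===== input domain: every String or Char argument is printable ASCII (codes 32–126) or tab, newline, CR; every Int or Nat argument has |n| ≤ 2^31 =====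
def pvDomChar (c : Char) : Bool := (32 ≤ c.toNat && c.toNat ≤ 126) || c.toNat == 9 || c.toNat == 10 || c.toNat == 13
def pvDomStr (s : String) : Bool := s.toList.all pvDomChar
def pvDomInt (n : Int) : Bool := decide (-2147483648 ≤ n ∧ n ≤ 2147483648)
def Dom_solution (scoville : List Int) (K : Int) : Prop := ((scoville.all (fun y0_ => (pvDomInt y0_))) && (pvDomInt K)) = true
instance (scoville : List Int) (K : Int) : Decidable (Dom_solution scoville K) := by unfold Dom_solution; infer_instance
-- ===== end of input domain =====

-- B drops heapq entirely: each round two linear min-scans (Python min + list.remove) pick the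
-- two smallest, the mix is appended at the end. Both Pythons mutate scoville in place;
-- the equivalence proved is about the return value only.

-- ===== PORT A =====
-- heapq is ported as a textbook array binary min-heap over the list (siftDown/siftUp), exact for the
-- observable behaviour of heapify/heappop/heappush on ints (pop yields the minimum, contents preserved).
def hGet (h : List Int) (i : Nat) : Int := h.getD i 0
def hSwap (h : List Int) (i j : Nat) : List Int := (h.set i (hGet h j)).set j (hGet h i)

-- index of the smallest among node i and its existing children
def sdTarget (h : List Int) (i : Nat) : Nat :=
  if 2*i+2 < h.length ∧
      hGet h (2*i+2) < hGet h (if 2*i+1 < h.length ∧ hGet h (2*i+1) < hGet h i then 2*i+1 else i)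
    then 2*i+2
  else if 2*i+1 < h.length ∧ hGet h (2*i+1) < hGet h i then 2*i+1 else i

-- the sift loops carry a fuel argument (h.length bounds their iterations: the sift index
-- moves strictly down/up the tree), so the recursion is structural
def siftDown : Nat → List Int → Nat → List Int
  | 0, h, _ => h
  | fuel+1, h, i =>
      if sdTarget h i ≤ i then h
      else siftDown fuel (hSwap h i (sdTarget h i)) (sdTarget h i)

def siftUp : Nat → List Int → Nat → List Int
  | 0, h, _ => h
  | fuel+1, h, i =>
      if i = 0 then h
      else if hGet h i < hGet h ((i-1)/2) then siftUp fuel (hSwap h i ((i-1)/2)) ((i-1)/2)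
      else h

def heapify (h : List Int) : List Int :=
  ((List.range (h.length / 2)).reverse).foldl (fun acc i => siftDown acc.length acc i) h

def heappop (h : List Int) : Int × List Int :=
  let last := hGet h (h.length - 1)
  let rest := h.dropLast
  if rest.isEmpty then (last, rest)
  else (hGet rest 0, siftDown (rest.set 0 last).length (rest.set 0 last) 0)

def heappush (h : List Int) (x : Int) : List Int := siftUp h.length (h ++ [x]) h.length

-- the while loop; fuel = heap size bounds its iterations (each one shrinks the heap by 1)
def solGo (K : Int) : Nat → List Int → Int → Int
  | 0, _, answer => answer
  | fuel+1, h, answer =>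
      if hGet h 0 < K then
        if h.length = 1 then -1
        else
          let p1 := heappop h
          let p2 := heappop p1.2
          solGo K fuel (heappush p2.2 (p1.1 + p2.1 * 2)) (answer + 1)
      else answer

def solution (scoville : List Int) (K : Int) : Int :=
  let h := heapify scoville
  solGo K h.length h 0

-- ===== PORT B =====
-- Python's min(s) with no key (exact for s ≠ [], the admitted inputs)
def pyMin (s : List Int) : Int := (PySem.List.min? s (fun x => x)).getD 0
-- Python's s.remove(v) (exact when v ∈ s, which holds at both call sites: v is min(s))
def pyRemove (s : List Int) (v : Int) : List Int := (PySem.List.remove? s v).getD s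

-- Source B's while loop; fuel = list length bounds its iterations (each removes two, appends one)
def altGo (K : Int) : Nat → List Int → Int → Int
  | 0, _, answer => answer
  | fuel+1, s, answer =>
      if pyMin s < K then
        if s.length = 1 then -1
        else
          let a := pyMin s
          let s1 := pyRemove s a
          let b := pyMin s1
          let s2 := pyRemove s1 b
          altGo K fuel (s2 ++ [a + b * 2]) (answer + 1)
      else answer

def solution_alt (scoville : List Int) (K : Int) : Int :=
  altGo K scoville.length scoville 0

-- ===== PRECONDITION & SPEC =====
-- Pre_ excludes only the empty list, on which A raises IndexError (scoville[0]); B raises there too (min([])).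
def Pre_solution (scoville : List Int) (K : Int) : Prop := scoville ≠ []
instance (scoville : List Int) (K : Int) : Decidable (Pre_solution scoville K) := by unfold Pre_solution; infer_instance
def pvWitness_solution : List Int × Int := ([1, 2, 3, 9, 10, 12], 7)

def Spec_solution (scoville : List Int) (K : Int) (out : Int) : Prop := out = solution_alt scoville K
instance (scoville : List Int) (K : Int) (out : Int) : Decidable (Spec_solution scoville K out) := by unfold Spec_solution; infer_instance

-- ===== CLAIM (what is proved, stated in full; the proofs are below) =====
def Claim_equal_solution : Prop := ∀ (scoville : List Int) (K : Int), Dom_solution scoville K → Pre_solution scoville K → Spec_solution scoville K (solution scoville K)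

-- ===== LEMMAS AND PROOFS =====

-- heap order: every non-root node j with parent index ≥ k is ≥ its parent
def HeapFrom (h : List Int) (k : Nat) : Prop :=
  ∀ j, 0 < j → j < h.length → k ≤ (j-1)/2 → hGet h ((j-1)/2) ≤ hGet h j

theorem sdTarget_gt (h : List Int) (i : Nat) (hgt : ¬ sdTarget h i ≤ i) :
    i < sdTarget h i ∧ sdTarget h i < h.length := by
  unfold sdTarget at hgt ⊢
  split_ifs at hgt ⊢ <;> omega

theorem hGet_set (h : List Int) (i k : Nat) (a : Int) :
    hGet (h.set i a) k = if k = i ∧ i < h.length then a else hGet h k := by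
  simp only [hGet, List.getD_eq_getElem?_getD, List.getElem?_set]
  split_ifs <;> simp_all

theorem hGet_hSwap_left (h : List Int) (i j : Nat) (hi : i < h.length) (hij : i ≠ j) :
    hGet (hSwap h i j) i = hGet h j := by
  simp only [hSwap, hGet_set, List.length_set]
  split_ifs with h1 h2 <;> simp_all

theorem hGet_hSwap_right (h : List Int) (i j : Nat) (hj : j < h.length) :
    hGet (hSwap h i j) j = hGet h i := by
  simp only [hSwap, hGet_set, List.length_set]
  split_ifs <;> simp_all

theorem hGet_hSwap_ne (h : List Int) (i j k : Nat) (hki : k ≠ i) (hkj : k ≠ j) :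
    hGet (hSwap h i j) k = hGet h k := by
  simp only [hSwap, hGet_set, List.length_set]
  split_ifs <;> simp_all

theorem cons_set_perm (t : List Int) : ∀ (m : Nat) (a : Int), m < t.length →
    (t.getD m 0 :: t.set m a).Perm (a :: t) := by
  induction t with
  | nil => intro m a hm; simp at hm
  | cons b t ih =>
    intro m a hm
    cases m with
    | zero => simpa using List.Perm.swap a b t
    | succ m =>
      simp only [List.getD_cons_succ, List.set_cons_succ]
      exact ((List.Perm.swap b (t.getD m 0) (t.set m a)).trans
        ((ih m a (by simpa using hm)).cons b)).trans (List.Perm.swap a b t)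

theorem hSwap_perm (h : List Int) (i j : Nat) (hi : i < h.length) (hj : j < h.length) :
    (hSwap h i j).Perm h := by
  unfold hSwap
  induction h generalizing i j with
  | nil => simp at hi
  | cons a t ih =>
    cases i with
    | zero =>
      cases j with
      | zero => simp [hGet]
      | succ m =>
        simp only [hGet, List.getD_cons_succ, List.getD_cons_zero, List.set_cons_zero,
          List.set_cons_succ]
        exact cons_set_perm t m a (by simpa using hj)
    | succ k =>
      cases j with
      | zero =>
        simp only [hGet, List.getD_cons_succ, List.getD_cons_zero, List.set_cons_zero,
          List.set_cons_succ]
        exact cons_set_perm t k a (by simpa using hi)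
      | succ m =>
        simp only [hGet, List.getD_cons_succ, List.set_cons_succ]
        exact (ih k m (by simpa using hi) (by simpa using hj)).cons a

theorem sdTarget_mem (h : List Int) (i : Nat) (hgt : ¬ sdTarget h i ≤ i) :
    sdTarget h i = 2*i+1 ∨ sdTarget h i = 2*i+2 := by
  unfold sdTarget at hgt ⊢
  split_ifs at hgt ⊢ <;> omega

theorem siftDown_perm (fuel : Nat) : ∀ (h : List Int) (i : Nat), (siftDown fuel h i).Perm h := by
  induction fuel with
  | zero => intro h i; exact List.Perm.refl h
  | succ fuel ih =>
    intro h i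
    rw [siftDown]
    by_cases hle : sdTarget h i ≤ i
    · rw [if_pos hle]
    · rw [if_neg hle]
      have hb := sdTarget_gt h i hle
      exact (ih _ _).trans (hSwap_perm h i (sdTarget h i) (by omega) hb.2)

theorem length_siftDown (fuel : Nat) (h : List Int) (i : Nat) :
    (siftDown fuel h i).length = h.length :=
  (siftDown_perm fuel h i).length_eq

theorem hGet_siftDown_lt (fuel : Nat) : ∀ (h : List Int) (i : Nat),
    ∀ j, j ≠ i → j < 2*i+1 → hGet (siftDown fuel h i) j = hGet h j := by
  induction fuel with
  | zero => intro h i j _ _; rfl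
  | succ fuel ih =>
    intro h i j hji hjlt
    rw [siftDown]
    by_cases hle : sdTarget h i ≤ i
    · rw [if_pos hle]
    · have hb := sdTarget_gt h i hle
      have hm := sdTarget_mem h i hle
      rw [if_neg hle]
      rw [ih _ _ j (by omega) (by omega)]
      exact hGet_hSwap_ne h i (sdTarget h i) j hji (by omega)

theorem sdTarget_spec (h : List Int) (i : Nat) :
    (2*i+1 < h.length → hGet h (sdTarget h i) ≤ hGet h (2*i+1)) ∧
    (2*i+2 < h.length → hGet h (sdTarget h i) ≤ hGet h (2*i+2)) ∧
    hGet h (sdTarget h i) ≤ hGet h i ∧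
    (¬ sdTarget h i ≤ i → hGet h (sdTarget h i) < hGet h i) := by
  unfold sdTarget
  split_ifs <;> refine ⟨?_, ?_, ?_, ?_⟩ <;> intros <;> omega

theorem sdTarget_eq_self (h : List Int) (i : Nat) (hle : sdTarget h i ≤ i) : sdTarget h i = i := by
  unfold sdTarget at hle ⊢
  split_ifs at hle ⊢ <;> omega

theorem siftDown_heap (fuel : Nat) : ∀ (h : List Int) (i : Nat), h.length ≤ fuel + i →
    HeapFrom h (i+1) →
    HeapFrom (siftDown fuel h i) i ∧
    (∀ b, b ≤ hGet h i → (2*i+1 < h.length → b ≤ hGet h (2*i+1)) →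
      (2*i+2 < h.length → b ≤ hGet h (2*i+2)) → b ≤ hGet (siftDown fuel h i) i) := by
  induction fuel with
  | zero =>
    intro h i hfuel hf
    simp only [siftDown]
    refine ⟨?_, fun b hb _ _ => hb⟩
    intro j hj0 hjlen hk
    omega
  | succ fuel ih =>
    intro h i hfuel hf
    rw [siftDown]
    by_cases hle : sdTarget h i ≤ i
    · rw [if_pos hle]
      have hs := sdTarget_spec h i
      rw [sdTarget_eq_self h i hle] at hs
      refine ⟨?_, fun b hb _ _ => hb⟩
      intro j hj0 hjlen hk
      by_cases hpi : (j-1)/2 = i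
      · have hj12 : j = 2*i+1 ∨ j = 2*i+2 := by omega
        rw [hpi]
        rcases hj12 with hj | hj <;> rw [hj]
        · exact hs.1 (hj ▸ hjlen)
        · exact hs.2.1 (hj ▸ hjlen)
      · exact hf j hj0 hjlen (by omega)
    · have hb := sdTarget_gt h i hle
      have hm := sdTarget_mem h i hle
      have hs := sdTarget_spec h i
      set m := sdTarget h i with hmdef
      have hswlen : (hSwap h i m).length = h.length := by simp [hSwap]
      rw [if_neg hle]
      have hpre : HeapFrom (hSwap h i m) (m+1) := by
        intro j hj0 hjlen hk
        rw [hswlen] at hjlen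
        rw [hGet_hSwap_ne h i m j (by omega) (by omega),
          hGet_hSwap_ne h i m ((j-1)/2) (by omega) (by omega)]
        exact hf j hj0 hjlen (by omega)
      obtain ⟨Hrec, Brec⟩ := ih (hSwap h i m) m (by omega) hpre
      have hswm : hGet (hSwap h i m) m = hGet h i := hGet_hSwap_right h i m hb.2
      have hswi : hGet (hSwap h i m) i = hGet h m := hGet_hSwap_left h i m (by omega) (by omega)
      have hfi : hGet (siftDown fuel (hSwap h i m) m) i = hGet h m := by
        rw [hGet_siftDown_lt fuel (hSwap h i m) m i (by omega) (by omega), hswi]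
      have hchild : ∀ c, (c = 2*m+1 ∨ c = 2*m+2) → c < (hSwap h i m).length →
          hGet h m ≤ hGet (hSwap h i m) c := by
        intro c hc hclen
        rw [hswlen] at hclen
        rw [hGet_hSwap_ne h i m c (by omega) (by omega)]
        have := hf c (by omega) hclen (by omega)
        have hpc : (c-1)/2 = m := by omega
        rwa [hpc] at this
      have hfm : hGet h m ≤ hGet (siftDown fuel (hSwap h i m) m) m := by
        apply Brec (hGet h m)
        · rw [hswm]; exact le_of_lt (hs.2.2.2 hle)
        · exact fun hc => hchild (2*m+1) (Or.inl rfl) hc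
        · exact fun hc => hchild (2*m+2) (Or.inr rfl) hc
      constructor
      · intro j hj0 hjlen hk
        rw [length_siftDown, hswlen] at hjlen
        by_cases hcase : m ≤ (j-1)/2
        · exact Hrec j hj0 (by rw [length_siftDown, hswlen]; exact hjlen) hcase
        · by_cases hpi : (j-1)/2 = i
          · by_cases hjm : j = m
            · rw [hpi, hfi, hjm]; exact hfm
            · have hfj : hGet (siftDown fuel (hSwap h i m) m) j = hGet h j := by
                rw [hGet_siftDown_lt fuel (hSwap h i m) m j hjm (by omega),
                  hGet_hSwap_ne h i m j (by omega) hjm]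
              rw [hpi, hfi, hfj]
              have hj12 : j = 2*i+1 ∨ j = 2*i+2 := by omega
              rcases hj12 with hj | hj <;> rw [hj]
              · exact hs.1 (by omega)
              · exact hs.2.1 (by omega)
          · have hfj : hGet (siftDown fuel (hSwap h i m) m) j = hGet h j := by
              rw [hGet_siftDown_lt fuel (hSwap h i m) m j (by omega) (by omega),
                hGet_hSwap_ne h i m j (by omega) (by omega)]
            have hfp : hGet (siftDown fuel (hSwap h i m) m) ((j-1)/2) = hGet h ((j-1)/2) := by
              rw [hGet_siftDown_lt fuel (hSwap h i m) m ((j-1)/2) (by omega) (by omega),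
                hGet_hSwap_ne h i m ((j-1)/2) (by omega) (by omega)]
            rw [hfj, hfp]
            exact hf j hj0 hjlen (by omega)
      · intro b hbi h1 h2
        rw [hfi]
        rcases hm with hm1 | hm1
        · rw [hm1]; exact h1 (by omega)
        · rw [hm1]; exact h2 (by omega)

theorem heapify_aux (k : Nat) : ∀ (h : List Int), HeapFrom h k →
    HeapFrom ((List.range k).reverse.foldl (fun acc i => siftDown acc.length acc i) h) 0 ∧
    ((List.range k).reverse.foldl (fun acc i => siftDown acc.length acc i) h).Perm h := by
  induction k with
  | zero =>
    intro h hf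
    simp only [List.range_zero, List.reverse_nil, List.foldl_nil]
    exact ⟨hf, List.Perm.refl h⟩
  | succ k ih =>
    intro h hf
    rw [List.range_succ, List.reverse_append, List.reverse_singleton, List.singleton_append,
      List.foldl_cons]
    obtain ⟨h1, h2⟩ := ih (siftDown h.length h k)
      (siftDown_heap h.length h k (by omega) hf).1
    exact ⟨h1, h2.trans (siftDown_perm h.length h k)⟩

theorem heapify_spec (h : List Int) : HeapFrom (heapify h) 0 ∧ (heapify h).Perm h := by
  unfold heapify
  apply heapify_aux
  intro j hj0 hjlen hk
  omega

theorem root_min (h : List Int) (hh : HeapFrom h 0) :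
    ∀ j, j < h.length → hGet h 0 ≤ hGet h j := by
  intro j
  induction j using Nat.strong_induction_on with
  | _ j ih =>
    intro hjlen
    rcases Nat.eq_zero_or_pos j with hj | hj
    · rw [hj]
    · calc hGet h 0 ≤ hGet h ((j-1)/2) := ih ((j-1)/2) (by omega) (by omega)
        _ ≤ hGet h j := hh j hj hjlen (by omega)

-- Python min(s): membership and minimality
theorem pyMin_spec (s : List Int) (hne : s ≠ []) :
    pyMin s ∈ s ∧ ∀ x ∈ s, pyMin s ≤ x := by
  unfold pyMin
  obtain ⟨m, hm⟩ : ∃ m, PySem.List.min? s (fun x => x) = some m := by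
    cases he : PySem.List.min? s (fun x => x) with
    | none => exact absurd ((PySem.List.min?_eq_none_iff s (fun x => x)).mp he) hne
    | some m => exact ⟨m, rfl⟩
  rw [hm]
  exact ⟨PySem.List.min?_mem hm, fun x hx => PySem.List.min?_isMin hm x hx⟩

-- the root of a heap h equals min(s) for any s it is a permutation of
theorem root_eq_pyMin (h s : List Int) (hh : HeapFrom h 0) (hp : h.Perm s) (hne : s ≠ []) :
    hGet h 0 = pyMin s := by
  obtain ⟨hmem, hmin⟩ := pyMin_spec s hne
  have hneh : h ≠ [] := by
    intro he; rw [he] at hp; exact hne (List.Perm.nil_eq hp).symm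
  have hlen : 0 < h.length := List.length_pos_iff.mpr hneh
  have hroot_mem : hGet h 0 ∈ h := by
    simp only [hGet, List.getD_eq_getElem?_getD, List.getElem?_eq_getElem hlen]
    exact List.getElem_mem hlen
  have h1 : pyMin s ≤ hGet h 0 := hmin _ (hp.mem_iff.mp hroot_mem)
  obtain ⟨j, hjlen, hje⟩ := List.getElem_of_mem (hp.mem_iff.mpr hmem)
  have h2 : hGet h 0 ≤ pyMin s := by
    have := root_min h hh j hjlen
    rwa [show hGet h j = pyMin s by
      simp only [hGet, List.getD_eq_getElem?_getD, List.getElem?_eq_getElem hjlen]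
      simpa using hje] at this
  omega

-- Python s.remove(v) for v ∈ s: the result with v back in front is a permutation of s
theorem pyRemove_perm (s : List Int) (v : Int) (hv : v ∈ s) :
    s.Perm (v :: pyRemove s v) := by
  unfold pyRemove
  rw [PySem.List.remove?_eq_some_erase s v hv]
  simpa using List.perm_cons_erase hv

theorem heappop_spec (h : List Int) (hne : h ≠ []) (hh : HeapFrom h 0) :
    HeapFrom (heappop h).2 0 ∧ h.Perm ((heappop h).1 :: (heappop h).2) ∧ (heappop h).1 = hGet h 0 := by
  unfold heappop
  have hlen : 0 < h.length := List.length_pos_iff.mpr hne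
  by_cases h1 : h.dropLast.isEmpty
  · -- h is a singleton
    obtain ⟨x, hx⟩ : ∃ x, h = [x] := by
      cases h with
      | nil => exact absurd rfl hne
      | cons y t =>
        cases t with
        | nil => exact ⟨y, rfl⟩
        | cons z t' => simp at h1
    subst hx
    simp only [h1, if_pos]
    refine ⟨?_, by simp [hGet], by simp [hGet]⟩
    intro j hj0 hjlen _
    simp [List.isEmpty_iff.mp h1] at hjlen
  · simp only [h1, if_neg, Bool.false_eq_true, not_false_iff]
    have hdne : h.dropLast ≠ [] := by simpa [List.isEmpty_iff] using h1
    have hL : 2 ≤ h.length := by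
      have := List.length_pos_iff.mpr hdne
      simp only [List.length_dropLast] at this
      omega
    set last := hGet h (h.length - 1) with hlast
    set h' := h.dropLast.set 0 last with hh'
    have hlen' : h'.length = h.length - 1 := by
      simp [hh', List.length_dropLast]
    have hget' : ∀ j, 0 < j → j < h'.length → hGet h' j = hGet h j := by
      intro j hj0 hjlen
      rw [hlen'] at hjlen
      simp only [hh', hGet, List.getD_eq_getElem?_getD, List.getElem?_set]
      rw [if_neg (by omega : ¬ 0 = j), List.getElem?_dropLast, if_pos (by omega)]
    have hget0 : hGet h' 0 = last := by
      simp only [hh', hGet, List.getD_eq_getElem?_getD, List.getElem?_set]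
      rw [if_pos trivial, if_pos (by simp only [List.length_dropLast]; omega)]
      rfl
    have hpre : HeapFrom h' 1 := by
      intro j hj0 hjlen hk
      rw [hget' j hj0 hjlen, hget' ((j-1)/2) (by omega) (by omega)]
      exact hh j hj0 (by omega) (by omega)
    obtain ⟨Hd, _⟩ := siftDown_heap h'.length h' 0 (by omega)
      (fun j hj0 hjlen hk => hpre j hj0 hjlen hk)
    have hdrop0 : hGet h.dropLast 0 = hGet h 0 := by
      simp only [hGet, List.getD_eq_getElem?_getD]
      rw [List.getElem?_dropLast, if_pos (by omega)]
    refine ⟨Hd, ?_, hdrop0⟩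
    rw [hdrop0]
    have hperm1 : (siftDown h'.length h' 0).Perm h' := siftDown_perm h'.length h' 0
    have hgetlast : last = h.getLast hne := by
      rw [hlast, List.getLast_eq_getElem]
      simp only [hGet, List.getD_eq_getElem?_getD,
        List.getElem?_eq_getElem (show h.length - 1 < h.length by omega)]
      rfl
    obtain ⟨y, t, hd, hy⟩ : ∃ y t, h.dropLast = y :: t ∧ hGet h 0 = y := by
      cases hdd : h.dropLast with
      | nil => exact absurd hdd hdne
      | cons y t =>
        refine ⟨y, t, rfl, ?_⟩
        rw [← hdrop0, hdd]
        rfl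
    have hperm2 : h'.Perm (last :: t) := by
      rw [hh', hd]
      simp
    have hback : h = (y :: t) ++ [h.getLast hne] := by
      rw [← hd, List.dropLast_append_getLast hne]
    have step1 : h.Perm (y :: (h.getLast hne :: t)) := by
      nth_rewrite 1 [hback]
      exact (List.perm_append_singleton _ _).cons y
    have step2 : (hGet h 0 :: (last :: t)).Perm (hGet h 0 :: siftDown h'.length h' 0) :=
      (hperm1.trans hperm2).symm.cons _
    rw [← hgetlast] at step1
    rw [hy]
    exact step1.trans (hy ▸ step2)

-- heap except possibly around the bubble i (with the grandparent bound on i's children)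
def SUInv (h : List Int) (i : Nat) : Prop :=
  (∀ j, 0 < j → j < h.length → j ≠ i → hGet h ((j-1)/2) ≤ hGet h j) ∧
  (∀ c, (c = 2*i+1 ∨ c = 2*i+2) → c < h.length → hGet h i ≤ hGet h c) ∧
  (0 < i → ∀ c, (c = 2*i+1 ∨ c = 2*i+2) → c < h.length → hGet h ((i-1)/2) ≤ hGet h c)

theorem siftUp_heap (fuel : Nat) : ∀ (h : List Int) (i : Nat), i ≤ fuel →
    i < h.length → SUInv h i → HeapFrom (siftUp fuel h i) 0 ∧ (siftUp fuel h i).Perm h := by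
  induction fuel with
  | zero =>
    intro h i hfuel hi hinv
    have hi0 : i = 0 := by omega
    subst hi0
    refine ⟨?_, List.Perm.refl h⟩
    intro j hj0 hjlen _
    exact hinv.1 j hj0 hjlen (by omega)
  | succ fuel ih =>
    intro h i hfuel hi hinv
    rw [siftUp]
    by_cases hi0 : i = 0
    · rw [if_pos hi0]
      subst hi0
      refine ⟨?_, List.Perm.refl h⟩
      intro j hj0 hjlen _
      exact hinv.1 j hj0 hjlen (by omega)
    · by_cases hcond : hGet h i < hGet h ((i-1)/2)
      · have hp : (i-1)/2 < i := by omega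
        have hplen : (i-1)/2 < h.length := by omega
        have hswlen : (hSwap h i ((i-1)/2)).length = h.length := by simp [hSwap]
        have hswi : hGet (hSwap h i ((i-1)/2)) i = hGet h ((i-1)/2) :=
          hGet_hSwap_left h i ((i-1)/2) hi (by omega)
        have hswp : hGet (hSwap h i ((i-1)/2)) ((i-1)/2) = hGet h i :=
          hGet_hSwap_right h i ((i-1)/2) hplen
        have hswo : ∀ k, k ≠ i → k ≠ (i-1)/2 → hGet (hSwap h i ((i-1)/2)) k = hGet h k :=
          fun k hk1 hk2 => hGet_hSwap_ne h i ((i-1)/2) k hk1 hk2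
        have hinv' : SUInv (hSwap h i ((i-1)/2)) ((i-1)/2) := by
          refine ⟨?_, ?_, ?_⟩
          · intro j hj0 hjlen hjp
            rw [hswlen] at hjlen
            by_cases hji : j = i
            · subst hji
              rw [hswp, hswi]
              exact le_of_lt hcond
            · rw [hswo j hji hjp]
              by_cases hq : (j-1)/2 = (i-1)/2
              · rw [hq, hswp]
                calc hGet h i ≤ hGet h ((i-1)/2) := le_of_lt hcond
                  _ = hGet h ((j-1)/2) := by rw [hq]
                  _ ≤ hGet h j := hinv.1 j hj0 hjlen hji
              · by_cases hqi : (j-1)/2 = i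
                · rw [hqi, hswi]
                  exact hinv.2.2 (by omega) j (by omega) hjlen
                · rw [hswo ((j-1)/2) hqi hq]
                  exact hinv.1 j hj0 hjlen hji
          · intro c hc hclen
            rw [hswlen] at hclen
            rw [hswp]
            by_cases hci : c = i
            · subst hci
              rw [hswi]
              exact le_of_lt hcond
            · rw [hswo c hci (by omega)]
              have hpc : (c-1)/2 = (i-1)/2 := by omega
              calc hGet h i ≤ hGet h ((i-1)/2) := le_of_lt hcond
                _ = hGet h ((c-1)/2) := by rw [hpc]
                _ ≤ hGet h c := hinv.1 c (by omega) hclen hci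
          · intro hp0 c hc hclen
            rw [hswlen] at hclen
            rw [hswo (((i-1)/2-1)/2) (by omega) (by omega)]
            have hpar : hGet h ((((i-1)/2)-1)/2) ≤ hGet h ((i-1)/2) :=
              hinv.1 ((i-1)/2) hp0 hplen (by omega)
            by_cases hci : c = i
            · subst hci
              rw [hswi]
              exact hpar
            · rw [hswo c hci (by omega)]
              have hpc : (c-1)/2 = (i-1)/2 := by omega
              calc hGet h (((i-1)/2-1)/2) ≤ hGet h ((i-1)/2) := hpar
                _ = hGet h ((c-1)/2) := by rw [hpc]
                _ ≤ hGet h c := hinv.1 c (by omega) hclen hci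
        obtain ⟨HA, HB⟩ := ih (hSwap h i ((i-1)/2)) ((i-1)/2) (by omega) (by omega) hinv'
        rw [if_neg hi0, if_pos hcond]
        exact ⟨HA, HB.trans (hSwap_perm h i ((i-1)/2) hi hplen)⟩
      · rw [if_neg hi0, if_neg hcond]
        refine ⟨?_, List.Perm.refl h⟩
        intro j hj0 hjlen _
        by_cases hji : j = i
        · subst hji
          exact not_lt.mp hcond
        · exact hinv.1 j hj0 hjlen hji

theorem heappush_spec (h : List Int) (x : Int) (hh : HeapFrom h 0) :
    HeapFrom (heappush h x) 0 ∧ (heappush h x).Perm (x :: h) := by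
  unfold heappush
  have hlen : (h ++ [x]).length = h.length + 1 := by simp
  have hgl : ∀ j, j < h.length → hGet (h ++ [x]) j = hGet h j := by
    intro j hj
    simp only [hGet, List.getD_eq_getElem?_getD]
    rw [List.getElem?_append_left hj]
  have hinv : SUInv (h ++ [x]) h.length := by
    refine ⟨?_, ?_, ?_⟩
    · intro j hj0 hjlen hji
      rw [hlen] at hjlen
      rw [hgl j (by omega), hgl ((j-1)/2) (by omega)]
      exact hh j hj0 (by omega) (by omega)
    · intro c hc hclen
      rw [hlen] at hclen
      omega
    · intro _ c hc hclen
      rw [hlen] at hclen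
      omega
  obtain ⟨HA, HB⟩ := siftUp_heap h.length (h ++ [x]) h.length le_rfl (by simp) hinv
  exact ⟨HA, HB.trans (List.perm_append_singleton x h)⟩

-- the two loops run in lockstep: the heap is at all times a permutation of B's plain list,
-- and a min-heap's root is the list's minimum — no ordering of B's list is needed
theorem loop_eq (K : Int) : ∀ fuel (h s : List Int) (ans : Int), HeapFrom h 0 →
    h.Perm s → s ≠ [] → solGo K fuel h ans = altGo K fuel s ans := by
  intro fuel
  induction fuel with
  | zero => intro h s ans _ _ _; rfl
  | succ fuel ih =>
    intro h s ans hh hp hne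
    have hneh : h ≠ [] := by
      intro he; rw [he] at hp; exact hne (List.Perm.nil_eq hp).symm
    have hroot : hGet h 0 = pyMin s := root_eq_pyMin h s hh hp hne
    have hlen : h.length = s.length := hp.length_eq
    simp only [solGo, altGo, hroot, hlen]
    by_cases hcond : pyMin s < K
    · rw [if_pos hcond, if_pos hcond]
      by_cases h1 : s.length = 1
      · rw [if_pos h1, if_pos h1]
      · rw [if_neg h1, if_neg h1]
        have hslen : 2 ≤ s.length := by
          have := List.length_pos_iff.mpr hne
          omega
        -- first extraction
        set a := pyMin s with ha
        obtain ⟨hh1, hperm1, hval1⟩ := heappop_spec h hneh hh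
        have hval1' : (heappop h).1 = a := by rw [hval1, hroot]
        have hpB1 : s.Perm (a :: pyRemove s a) := pyRemove_perm s a (pyMin_spec s hne).1
        have hp1 : (heappop h).2.Perm (pyRemove s a) := by
          have := (hperm1.symm.trans hp).trans hpB1
          rw [hval1'] at this
          exact this.cons_inv
        have hs1len : (pyRemove s a).length = s.length - 1 := by
          have := hpB1.length_eq
          simp only [List.length_cons] at this
          omega
        have hne1 : pyRemove s a ≠ [] := by
          intro he
          rw [he] at hs1len
          simp at hs1len
          omega
        have hneh1 : (heappop h).2 ≠ [] := by
          intro he; rw [he] at hp1; exact hne1 (List.Perm.nil_eq hp1).symm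
        -- second extraction
        set b := pyMin (pyRemove s a) with hb
        obtain ⟨hh2, hperm2, hval2⟩ := heappop_spec (heappop h).2 hneh1 hh1
        have hval2' : (heappop (heappop h).2).1 = b := by
          rw [hval2]
          exact root_eq_pyMin _ _ hh1 hp1 hne1
        have hpB2 : (pyRemove s a).Perm (b :: pyRemove (pyRemove s a) b) :=
          pyRemove_perm _ b (pyMin_spec _ hne1).1
        have hp2 : (heappop (heappop h).2).2.Perm (pyRemove (pyRemove s a) b) := by
          have := (hperm2.symm.trans hp1).trans hpB2
          rw [hval2'] at this
          exact this.cons_inv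
        -- push the mix / append the mix
        obtain ⟨hh3, hperm3⟩ :=
          heappush_spec (heappop (heappop h).2).2 ((heappop h).1 + (heappop (heappop h).2).1 * 2) hh2
        rw [hval1', hval2'] at hh3 hperm3 ⊢
        apply ih
        · exact hh3
        · exact hperm3.trans ((hp2.cons _).trans (List.perm_append_singleton _ _).symm)
        · simp
    · rw [if_neg hcond, if_neg hcond]

-- ===== VERDICT (by name: the statement is the Claim_ definition above) =====
theorem solution_spec : Claim_equal_solution := by
  intro scoville K _ hpre
  unfold Spec_solution solution solution_alt
  obtain ⟨hheap, hperm⟩ := heapify_spec scoville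
  have hlen : (heapify scoville).length = scoville.length := hperm.length_eq
  simp only []
  rw [hlen]
  exact loop_eq K scoville.length (heapify scoville) scoville 0 hheap hperm hpre
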